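-- pv_equiv track=rewrite | github.com/renaudbmg/programmation_1A | TD1/main.py | longest_word_possible
-- ===== SOURCE A (Python) =====
-- def words_possible(available_words, letters):
--     words = []
--     for word in available_words:
--         letters_available = list(letters)
--         can_form = True
--         for letter in word:
--             if letter not in letters_available:
--                 can_form = False
--             else:
--                 letters_available.remove(letter)
--         if can_form:
--             words.append(word)
--     return words
--
-- def longest_word_possible(available_words, letters):
--     length = 0
--     longest_word = []
--     words = words_possible(available_words, letters)
--     for word in words:
--         if len(word) > length:
--             longest_word = [word]
--             length = len(word)
--         elif len(word) == length:
--             longest_word.append(word)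
--     return (longest_word, length)
-- ===== SOURCE B (Python) =====
-- def longest_word_possible(available_words, letters):
--     words = [w for w in available_words
--              if all(w.count(c) <= letters.count(c) for c in w)]
--     max_len = max((len(w) for w in words), default=0)
--     return ([w for w in words if len(w) == max_len], max_len)
-- ===== Notes on version B (the rewrite author's own statement) =====
-- stated objective: simpler
-- what changed: Feasibility is decided by per-character count comparison (str.count) instead of destructively removing letters from a working list, and the result is computed by a max pass followed by a filter pass instead of the online best-so-far accumulator.
import Mathlib
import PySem

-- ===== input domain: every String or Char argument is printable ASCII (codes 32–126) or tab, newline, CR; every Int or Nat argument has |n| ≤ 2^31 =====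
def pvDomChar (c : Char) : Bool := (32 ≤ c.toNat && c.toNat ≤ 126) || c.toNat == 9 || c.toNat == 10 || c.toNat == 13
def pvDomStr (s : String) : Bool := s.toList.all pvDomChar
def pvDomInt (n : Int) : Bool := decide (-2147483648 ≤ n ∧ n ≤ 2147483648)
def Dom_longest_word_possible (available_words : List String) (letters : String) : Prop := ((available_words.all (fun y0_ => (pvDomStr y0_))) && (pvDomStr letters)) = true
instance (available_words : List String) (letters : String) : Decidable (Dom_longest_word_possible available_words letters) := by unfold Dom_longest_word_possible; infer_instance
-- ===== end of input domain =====

-- B replaces A's destructive letter-removal feasibility check by per-character count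
-- comparison, and A's online best-so-far accumulator by a max pass followed by a filter
-- pass (objective: simpler; same asymptotic cost).

-- ===== PORT A =====
-- inner loop of words_possible: state (letters_available, can_form)
def pvWordsPossible (available_words : List String) (letters : String) : List String :=
  available_words.foldl (fun words word =>
    let st := word.toList.foldl (fun (st : List Char × Bool) letter =>
      if letter ∉ st.1 then (st.1, false)
      else ((PySem.List.remove? st.1 letter).getD st.1, st.2)) (letters.toList, true)
    if st.2 then words ++ [word] else words) []

def longest_word_possible (available_words : List String) (letters : String) : List String × Int :=
  let words := pvWordsPossible available_words letters
  words.foldl (fun (st : List String × Int) word =>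
    if (word.length : Int) > st.2 then ([word], (word.length : Int))
    else if (word.length : Int) = st.2 then (st.1 ++ [word], st.2)
    else st) ([], 0)

-- ===== PORT B =====
-- w.count(c) for a single character c is ported as List.count on the character list (exact)
def longest_word_possible_alt (available_words : List String) (letters : String) : List String × Int :=
  let words := available_words.filter (fun w =>
    w.toList.all (fun c => w.toList.count c ≤ letters.toList.count c))
  let maxLen : Int := words.foldl (fun a w => max a (w.length : Int)) 0
  (words.filter (fun w => (w.length : Int) = maxLen), maxLen)

-- ===== PRECONDITION & SPEC =====
def Spec_longest_word_possible (available_words : List String) (letters : String) (out : List String × Int) : Prop := out = longest_word_possible_alt available_words letters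
instance (available_words : List String) (letters : String) (out : List String × Int) : Decidable (Spec_longest_word_possible available_words letters out) := by unfold Spec_longest_word_possible; infer_instance

-- ===== CLAIM (what is proved, stated in full; the proofs are below) =====
def Claim_equal_longest_word_possible : Prop := ∀ (available_words : List String) (letters : String), Dom_longest_word_possible available_words letters → Spec_longest_word_possible available_words letters (longest_word_possible available_words letters)

-- ===== LEMMAS AND PROOFS =====

-- removing one available copy of c and checking the tail equals checking c :: tail against the full supply
lemma counts_erase_iff (c : Char) (t avail : List Char) (hc : c ∈ avail) :
    (∀ d ∈ t, t.count d ≤ (avail.erase c).count d) ↔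
    (∀ d ∈ c :: t, (c :: t).count d ≤ avail.count d) := by
  have hc1 : 1 ≤ avail.count c := List.one_le_count_iff.mpr hc
  constructor
  · intro h d hd
    rcases List.mem_cons.mp hd with rfl | hdt
    · by_cases hdt' : d ∈ t
      · have := h d hdt'
        rw [List.count_erase] at this
        simp only [beq_self_eq_true, if_pos, List.count_cons_self] at *
        omega
      · rw [List.count_cons_self, List.count_eq_zero_of_not_mem hdt']
        omega
    · have := h d hdt
      rw [List.count_erase] at this
      by_cases hdc : d = c
      · subst hdc
        simp only [beq_self_eq_true, if_pos, List.count_cons_self] at *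
        omega
      · simp only [beq_iff_eq] at this
        rw [if_neg (fun he => hdc he.symm)] at this
        rw [List.count_cons, if_neg (by simp only [beq_iff_eq]; exact fun he => hdc he.symm)]
        omega
  · intro h d hd
    have := h d (List.mem_cons_of_mem _ hd)
    rw [List.count_erase]
    by_cases hdc : d = c
    · subst hdc
      rw [List.count_cons_self] at this
      simp only [beq_self_eq_true, if_pos]
      omega
    · rw [List.count_cons, if_neg (by simp only [beq_iff_eq]; exact fun he => hdc he.symm)] at this
      simp only [beq_iff_eq]
      rw [if_neg (fun he => hdc he.symm)]
      omega

-- A's inner removal loop succeeds iff every character's multiplicity fits the supply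
lemma inner_loop_eq_counts (word avail : List Char) (b : Bool) :
    (word.foldl (fun (st : List Char × Bool) letter =>
      if letter ∉ st.1 then (st.1, false)
      else ((PySem.List.remove? st.1 letter).getD st.1, st.2)) (avail, b)).2
    = (b && word.all (fun c => word.count c ≤ avail.count c)) := by
  induction word generalizing avail b with
  | nil => simp
  | cons c t ih =>
    rw [List.foldl_cons]
    by_cases hc : c ∈ avail
    · rw [if_neg (not_not_intro hc), PySem.List.remove?_eq_some_erase avail c hc,
        Option.getD_some, ih]
      congr 1
      rw [Bool.eq_iff_iff]
      simp only [List.all_eq_true, decide_eq_true_eq]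
      exact counts_erase_iff c t avail hc
    · rw [if_pos hc, ih, Bool.false_and]
      have : ((c :: t).all (fun d => (c :: t).count d ≤ avail.count d)) = false := by
        rw [Bool.eq_false_iff]
        intro hall
        have := (List.all_eq_true.mp hall) c List.mem_cons_self
        rw [decide_eq_true_eq, List.count_cons_self,
          List.count_eq_zero_of_not_mem hc] at this
        omega
      rw [this, Bool.and_false]

-- A's words_possible is B's filter
lemma wordsPossible_eq_filter (available_words : List String) (letters : String) :
    pvWordsPossible available_words letters
    = available_words.filter (fun w =>
        w.toList.all (fun c => w.toList.count c ≤ letters.toList.count c)) := by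
  unfold pvWordsPossible
  rw [PySem.List.foldl_congr_mem' available_words _
    (fun words word => if word.toList.all
        (fun c => word.toList.count c ≤ letters.toList.count c)
      then words ++ [word] else words) [] ?_]
  · simpa using PySem.List.foldl_append_if_eq_filter
      (fun w => w.toList.all (fun c => w.toList.count c ≤ letters.toList.count c))
      available_words []
  · intro word _ acc
    simp only [inner_loop_eq_counts, Bool.true_and]

-- A's online best-so-far scan, characterised in closed form
lemma scan_eq (F : List String) (acc : List String) (m : Int) :
    F.foldl (fun (st : List String × Int) word =>
      if (word.length : Int) > st.2 then ([word], (word.length : Int))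
      else if (word.length : Int) = st.2 then (st.1 ++ [word], st.2)
      else st) (acc, m)
    = (if m < List.foldl (fun a w => max a (w.length : Int)) m F
        then F.filter (fun w => (w.length : Int) = List.foldl (fun a w => max a (w.length : Int)) m F)
        else acc ++ F.filter (fun w => (w.length : Int) = m),
       List.foldl (fun a w => max a (w.length : Int)) m F) := by
  induction F generalizing acc m with
  | nil => simp
  | cons w ws ih =>
    have hM := PySem.List.le_foldl_max_int ws (fun w => (w.length : Int)) (max m (w.length : Int))
    simp only [List.foldl_cons]
    by_cases h1 : (w.length : Int) > m
    · rw [if_pos h1, ih]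
      have hmax : max m (w.length : Int) = (w.length : Int) := by omega
      simp only [hmax] at hM ⊢
      set M := ws.foldl (fun a w => max a (w.length : Int)) ((w.length : Int)) with hMdef
      rw [if_pos (show m < M by omega)]
      by_cases h2 : (w.length : Int) < M
      · rw [if_pos h2, List.filter_cons]
        simp [show ¬ ((w.length : Int) = M) by omega]
      · have hwM : (w.length : Int) = M := by omega
        rw [if_neg h2, List.filter_cons]
        simp [hwM]
    · rw [if_neg h1]
      have hmax : max m (w.length : Int) = m := by omega
      simp only [hmax] at hM ⊢
      set M := ws.foldl (fun a w => max a (w.length : Int)) m with hMdef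
      by_cases h2 : (w.length : Int) = m
      · rw [if_pos h2, ih]
        by_cases h3 : m < M
        · rw [if_pos h3, if_pos h3, List.filter_cons]
          simp [show ¬ ((w.length : Int) = M) by omega, ← hMdef]
        · rw [if_neg h3, if_neg h3, List.filter_cons]
          simp [h2, List.append_assoc, ← hMdef]
      · rw [if_neg h2, ih]
        by_cases h3 : m < M
        · rw [if_pos h3, if_pos h3, List.filter_cons]
          simp [show ¬ ((w.length : Int) = M) by omega, ← hMdef]
        · rw [if_neg h3, if_neg h3, List.filter_cons]
          simp [h2, ← hMdef]

-- ===== VERDICT (by name: the statement is the Claim_ definition above) =====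
theorem longest_word_possible_spec : Claim_equal_longest_word_possible := by
  intro available_words letters _
  unfold Spec_longest_word_possible longest_word_possible longest_word_possible_alt
  rw [wordsPossible_eq_filter]
  set F := available_words.filter (fun w =>
    w.toList.all (fun c => w.toList.count c ≤ letters.toList.count c)) with hF
  rw [scan_eq]
  have hM := PySem.List.le_foldl_max_int F (fun w => (w.length : Int)) 0
  set M := List.foldl (fun a w => max a ((w.length : Int))) 0 F with hMdef
  by_cases h : (0 : Int) < M
  · rw [if_pos h]
  · have hM0 : M = 0 := by omega
    rw [if_neg h, List.nil_append]
    show (F.filter (fun w => (w.length : Int) = 0), M)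
      = (F.filter (fun w => (w.length : Int) = M), M)
    rw [hM0]
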